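-- pv_equiv track=rewrite | github.com/CheBlankenship/python_renshu | review/find_min_num.py | find_min_two
-- ===== SOURCE A (Python) =====
-- def find_min_two(listOfNums):
--     if len(listOfNums) > 2:
--         smallest_num = listOfNums[0]
--         if listOfNums[0] < listOfNums[1]:
--             smallest_num = listOfNums[0]
--             listOfNums.pop(1)
--             return find_min_two(listOfNums)
--         else:
--             listOfNums.pop(0)
--             return find_min_two(listOfNums)
--
--     else:
--         return listOfNums[0]
-- ===== SOURCE B (Python) =====
-- def find_min_two(listOfNums):
--     if len(listOfNums) > 1:
--         return min(listOfNums[:-1])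
--     return listOfNums[0]
-- ===== Notes on version B (the rewrite author's own statement) =====
-- stated objective: faster
-- what changed: Replaces the quadratic pop-and-recurse scan with a single min() over the list minus its last element (B does not mutate the argument; A pops it down to length 2).
import Mathlib
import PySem

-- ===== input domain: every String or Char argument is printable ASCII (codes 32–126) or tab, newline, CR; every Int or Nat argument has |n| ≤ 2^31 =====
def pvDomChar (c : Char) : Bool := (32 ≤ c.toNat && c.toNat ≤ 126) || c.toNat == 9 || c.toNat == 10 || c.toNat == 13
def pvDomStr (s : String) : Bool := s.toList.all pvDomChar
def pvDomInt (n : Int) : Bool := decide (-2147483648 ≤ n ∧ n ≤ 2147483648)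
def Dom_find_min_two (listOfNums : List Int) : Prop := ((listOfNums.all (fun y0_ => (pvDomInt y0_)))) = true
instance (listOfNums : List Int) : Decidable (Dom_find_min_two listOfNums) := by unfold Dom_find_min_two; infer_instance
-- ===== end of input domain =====

-- B computes min(listOfNums[:-1]) directly instead of A's pop-and-recurse scan; equivalence is
-- about the RETURN value only: A pops the argument down to length ≤ 2 in place, B does not mutate it.

-- ===== PORT A =====
-- A's `len > 2` test plus pop(1)/pop(0) on the first two elements is transliterated as a match on
-- the first three elements; the final `listOfNums[0]` is pyGet? (Pre_ excludes the empty list,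
-- where Python raises IndexError).
def find_min_two (listOfNums : List Int) : Int :=
  match listOfNums with
  | a :: b :: c :: rest =>
      if a < b then find_min_two (a :: c :: rest)   -- listOfNums.pop(1); recurse
      else find_min_two (b :: c :: rest)            -- listOfNums.pop(0); recurse
  | l => (PySem.List.pyGet? l 0).getD 0
termination_by listOfNums.length

-- ===== PORT B =====
def find_min_two_alt (listOfNums : List Int) : Int :=
  if listOfNums.length > 1 then
    (PySem.List.min? (PySem.List.slice listOfNums none (some (-1))) (fun x => x)).getD 0
  else
    (PySem.List.pyGet? listOfNums 0).getD 0

-- ===== PRECONDITION & SPEC =====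
-- Python A raises IndexError on the empty list (its final indexing step); that input is excluded.
def Pre_find_min_two (listOfNums : List Int) : Prop := listOfNums ≠ []
instance (listOfNums : List Int) : Decidable (Pre_find_min_two listOfNums) := by unfold Pre_find_min_two; infer_instance
def pvWitness_find_min_two : List Int := [3, 1, 2]

def Spec_find_min_two (listOfNums : List Int) (out : Int) : Prop := out = find_min_two_alt listOfNums
instance (listOfNums : List Int) (out : Int) : Decidable (Spec_find_min_two listOfNums out) := by unfold Spec_find_min_two; infer_instance

-- ===== CLAIM (what is proved, stated in full; the proofs are below) =====
def Claim_equal_find_min_two : Prop := ∀ (listOfNums : List Int), Dom_find_min_two listOfNums → Pre_find_min_two listOfNums → Spec_find_min_two listOfNums (find_min_two listOfNums)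

-- ===== LEMMAS AND PROOFS =====

-- A on a list of ≥ 2 elements computes the running min of everything but the last element.
theorem find_min_two_char (rest : List Int) : ∀ a b : Int,
    find_min_two (a :: b :: rest) = List.foldl min a ((b :: rest).dropLast) := by
  induction rest with
  | nil => intro a b; simp [find_min_two]
  | cons c rs ih =>
      intro a b
      rw [find_min_two]
      have hdrop : ((b :: c :: rs).dropLast) = b :: (c :: rs).dropLast := rfl
      rw [hdrop]
      simp only [List.foldl_cons]
      by_cases h : a < b
      · rw [if_pos h, ih a c]
        have : min a b = a := min_eq_left (le_of_lt h)
        rw [this]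
      · rw [if_neg h, ih b c]
        have : min a b = b := min_eq_right (le_of_not_gt h)
        rw [this]

-- ===== VERDICT (by name: the statement is the Claim_ definition above) =====
theorem find_min_two_spec : Claim_equal_find_min_two := by
  intro l _ hpre
  unfold Spec_find_min_two
  match l with
  | [] => exact absurd rfl hpre
  | [a] => simp [find_min_two, find_min_two_alt, PySem.List.pyGet?, PySem.List.pyIdx?]
  | a :: b :: rest =>
      rw [find_min_two_char rest a b]
      unfold find_min_two_alt
      rw [if_pos (by simp)]
      rw [PySem.List.slice_to_neg_one]
      have hdrop : ((a :: b :: rest).dropLast) = a :: (b :: rest).dropLast := rfl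
      rw [hdrop, PySem.List.min?_id_cons]
      rfl
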